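-- pv_equiv track=rewrite | github.com/kimjiho1125/AlgorithmStudy | 프로그래머스/3/12987. 숫자 게임/숫자 게임.py | solution
-- ===== SOURCE A (Python) =====
-- def solution(A, B):
--     answer = 0
--     A.sort()
--     B.sort()
--     for n in A:
--         for i in range(len(B)):
--             if n < B[i]:
--                 B.pop(i)
--                 answer += 1
--                 break
--
--     return answer
-- ===== SOURCE B (Python) =====
-- def solution(A, B):
--     sa = sorted(A)
--     sb = sorted(B)
--     ans = 0
--     j = 0
--     n = len(sb)
--     for a in sa:
--         while j < n and sb[j] <= a:
--             j += 1
--         if j < n: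
--             ans += 1
--             j += 1
--     return ans
-- ===== Notes on version B (the rewrite author's own statement) =====
-- stated objective: faster
-- what changed: Replaces A's per-element rescans of B with list.pop (quadratic) by a single two-pointer sweep over the two sorted lists, never rescanning or mutating B.
import Mathlib
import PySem

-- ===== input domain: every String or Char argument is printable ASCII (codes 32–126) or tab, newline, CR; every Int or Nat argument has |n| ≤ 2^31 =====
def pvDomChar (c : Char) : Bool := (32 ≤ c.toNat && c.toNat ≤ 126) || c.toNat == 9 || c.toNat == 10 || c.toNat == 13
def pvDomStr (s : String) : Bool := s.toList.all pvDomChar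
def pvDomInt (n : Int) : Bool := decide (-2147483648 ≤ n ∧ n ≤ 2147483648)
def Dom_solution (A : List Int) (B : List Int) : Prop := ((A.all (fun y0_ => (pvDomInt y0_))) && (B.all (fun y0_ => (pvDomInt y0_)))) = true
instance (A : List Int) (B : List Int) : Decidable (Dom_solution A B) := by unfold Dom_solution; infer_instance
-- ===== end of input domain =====

-- B replaces A's per-element rescans of B with list.pop (quadratic) by a single two-pointer
-- sweep over the two sorted lists (faster). A sorts both arguments in place and pops from B;
-- B does not mutate its arguments: the equivalence proved here is about the RETURN value only.

-- ===== PORT A =====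
-- inner loop of A: scan B left to right, pop the first element greater than n (1 if popped)
def popStep (n : Int) : List Int → List Int × Int
  | [] => ([], 0)
  | b :: t =>
    if n < b then (t, 1)
    else
      let r := popStep n t
      (b :: r.1, r.2)

def solution (A : List Int) (B : List Int) : Int :=
  let As := PySem.List.sorted A (fun x => x) false
  let Bs := PySem.List.sorted B (fun x => x) false
  (As.foldl (fun (st : List Int × Int) n =>
      let r := popStep n st.1
      (r.1, st.2 + r.2)) (Bs, 0)).2

-- ===== PORT B =====
-- the `while j < n and sb[j] <= a: j += 1` loop of Source B
def skipLe (sb : List Int) (a : Int) (j : Nat) : Nat :=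
  if h : j < sb.length then
    if sb[j] ≤ a then skipLe sb a (j + 1) else j
  else j
termination_by sb.length - j

def solution_alt (A : List Int) (B : List Int) : Int :=
  let sa := PySem.List.sorted A (fun x => x) false
  let sb := PySem.List.sorted B (fun x => x) false
  let n := sb.length
  (sa.foldl (fun (st : Int × Nat) a =>
      let j := skipLe sb a st.2
      if j < n then (st.1 + 1, j + 1) else (st.1, j)) (0, 0)).1

-- ===== PRECONDITION & SPEC =====
def Spec_solution (A : List Int) (B : List Int) (out : Int) : Prop := out = solution_alt A B
instance (A : List Int) (B : List Int) (out : Int) : Decidable (Spec_solution A B out) := by unfold Spec_solution; infer_instance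

-- ===== CLAIM (what is proved, stated in full; the proofs are below) =====
def Claim_equal_solution : Prop := ∀ (A : List Int) (B : List Int), Dom_solution A B → Spec_solution A B (solution A B)

-- ===== LEMMAS AND PROOFS =====

-- common specification of the match count
def gCount : List Int → List Int → Int
  | [], _ => 0
  | a :: as, bs =>
    match bs.dropWhile (fun b => decide (b ≤ a)) with
    | [] => gCount as []
    | _ :: t => 1 + gCount as t

lemma popStep_eq (n : Int) (bs : List Int) :
    popStep n bs =
      match bs.dropWhile (fun b => decide (b ≤ n)) with
      | [] => (bs, 0)
      | _ :: t => (bs.takeWhile (fun b => decide (b ≤ n)) ++ t, 1) := by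
  induction bs with
  | nil => simp [popStep]
  | cons b t ih =>
    by_cases h : n < b
    · have hb : (decide (b ≤ n)) = false := by simp; omega
      simp [popStep, h, hb]
    · have hb : (decide (b ≤ n)) = true := by simp; omega
      simp only [popStep, if_neg h, List.dropWhile_cons, List.takeWhile_cons, hb, ih]
      cases t.dropWhile (fun b => decide (b ≤ n)) <;> simp

lemma popStep_append (n : Int) (p bs : List Int) (hp : ∀ x ∈ p, x ≤ n) :
    popStep n (p ++ bs) = (p ++ (popStep n bs).1, (popStep n bs).2) := by
  induction p with
  | nil => simp
  | cons x p ih =>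
    have hx : ¬ n < x := by have := hp x (by simp); omega
    simp only [List.cons_append, popStep, if_neg hx,
      ih (fun y hy => hp y (by simp [hy]))]

def aFold (ns : List Int) (st : List Int × Int) : List Int × Int :=
  ns.foldl (fun st n =>
    let r := popStep n st.1
    (r.1, st.2 + r.2)) st

lemma aFold_cons (n : Int) (ns : List Int) (bs : List Int) (c : Int) :
    aFold (n :: ns) (bs, c) = aFold ns ((popStep n bs).1, c + (popStep n bs).2) := rfl

lemma aFold_add (ns : List Int) (bs : List Int) (c : Int) :
    aFold ns (bs, c) = ((aFold ns (bs, 0)).1, c + (aFold ns (bs, 0)).2) := by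
  induction ns generalizing bs c with
  | nil => simp [aFold]
  | cons n ns ih =>
    rw [aFold_cons, aFold_cons, ih, ih ((popStep n bs).1) (0 + (popStep n bs).2)]
    simp only [Prod.mk.injEq]
    exact ⟨trivial, by ring⟩

lemma aFold_prefix (ns p bs : List Int) (hp : ∀ x ∈ p, ∀ m ∈ ns, x ≤ m) :
    (aFold ns (p ++ bs, 0)).2 = (aFold ns (bs, 0)).2 := by
  induction ns generalizing bs with
  | nil => simp [aFold]
  | cons n ns ih =>
    rw [aFold_cons, aFold_cons, popStep_append n p bs (fun x hx => hp x hx n (by simp))]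
    have hrec := ih ((popStep n bs).1) (fun x hx m hm => hp x hx m (by simp [hm]))
    rw [aFold_add ns (p ++ (popStep n bs).1), aFold_add ns ((popStep n bs).1)]
    simp [hrec]

lemma aFold_eq_gCount (ns bs : List Int) (hns : ns.Pairwise (· ≤ ·))
    (hbs : bs.Pairwise (· ≤ ·)) : (aFold ns (bs, 0)).2 = gCount ns bs := by
  induction ns generalizing bs with
  | nil => simp [aFold, gCount]
  | cons n ns ih =>
    have hns' := (List.pairwise_cons.mp hns).2
    have hle : ∀ m ∈ ns, n ≤ m := (List.pairwise_cons.mp hns).1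
    rw [aFold_cons, popStep_eq, gCount]
    cases hd : bs.dropWhile (fun b => decide (b ≤ n)) with
    | nil =>
      have hall : ∀ x ∈ bs, x ≤ n := by
        intro x hx
        have := List.dropWhile_eq_nil_iff.mp hd x hx
        simpa using this
      simp only
      have h1 : (aFold ns (bs, 0 + 0)).2 = (aFold ns (bs, 0)).2 := by norm_num
      rw [h1]
      have h2 : (aFold ns (bs ++ ([] : List Int), 0)).2 = (aFold ns ([], 0)).2 :=
        aFold_prefix ns bs [] (fun x hx m hm => le_trans (hall x hx) (hle m hm))
      simp only [List.append_nil] at h2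
      rw [h2, ih [] hns' (by simp)]
    | cons b t =>
      simp only
      rw [aFold_add]
      have hpre : (aFold ns (bs.takeWhile (fun b => decide (b ≤ n)) ++ t, 0)).2
          = (aFold ns (t, 0)).2 := by
        apply aFold_prefix
        intro x hx m hm
        have hxn : x ≤ n := by simpa using List.mem_takeWhile_imp hx
        exact le_trans hxn (hle m hm)
      have ht : t.Pairwise (· ≤ ·) := by
        have hdw : (bs.dropWhile (fun b => decide (b ≤ n))).Pairwise (· ≤ ·) :=
          hbs.sublist (List.dropWhile_sublist _)
        rw [hd] at hdw
        exact (List.pairwise_cons.mp hdw).2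
      rw [hpre, ih t hns' ht]
      ring

lemma skipLe_drop (sb : List Int) (a : Int) (j : Nat) :
    sb.drop (skipLe sb a j) = (sb.drop j).dropWhile (fun b => decide (b ≤ a)) := by
  fun_induction skipLe sb a j with
  | case1 j h hle ih =>
    rw [ih, List.drop_eq_getElem_cons h, List.dropWhile_cons]
    simp [hle]
  | case2 j h hle =>
    conv_rhs => rw [List.drop_eq_getElem_cons h, List.dropWhile_cons]
    simp only [decide_eq_true_eq, if_neg hle]
    exact List.drop_eq_getElem_cons h
  | case3 j h =>
    have : sb.drop j = [] := List.drop_eq_nil_of_le (by omega)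
    simp [this]

lemma skipLe_le_length (sb : List Int) (a : Int) (j : Nat) (h : j ≤ sb.length) :
    skipLe sb a j ≤ sb.length := by
  fun_induction skipLe sb a j with
  | case1 j h' hle ih => exact ih (by omega)
  | case2 j h' hle => omega
  | case3 j h' => omega

def bFold (sb : List Int) (ns : List Int) (st : Int × Nat) : Int × Nat :=
  ns.foldl (fun st a =>
    let j := skipLe sb a st.2
    if j < sb.length then (st.1 + 1, j + 1) else (st.1, j)) st

lemma bFold_eq_gCount (sb : List Int) (ns : List Int) (j : Nat) (c : Int)
    (hj : j ≤ sb.length) : (bFold sb ns (c, j)).1 = c + gCount ns (sb.drop j) := by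
  induction ns generalizing j c with
  | nil => simp [bFold, gCount]
  | cons a ns ih =>
    simp only [bFold, List.foldl_cons, gCount] at *
    have hdrop := skipLe_drop sb a j
    have hle := skipLe_le_length sb a j hj
    by_cases hlt : skipLe sb a j < sb.length
    · rw [if_pos hlt]
      rw [← hdrop, List.drop_eq_getElem_cons hlt]
      simp only
      rw [ih (skipLe sb a j + 1) (c + 1) (by omega)]
      ring
    · rw [if_neg hlt]
      have hnil : sb.drop (skipLe sb a j) = [] := List.drop_eq_nil_of_le (by omega)
      rw [← hdrop, hnil]
      simp only
      rw [ih (skipLe sb a j) c hle, hnil]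

-- ===== VERDICT (by name: the statement is the Claim_ definition above) =====
theorem solution_spec : Claim_equal_solution := by
  intro A B _
  unfold Spec_solution solution solution_alt
  simp only
  have hsa : (PySem.List.sorted A (fun x => x) false).Pairwise (· ≤ ·) :=
    PySem.List.sorted_pairwise A (fun x => x)
  have hsb : (PySem.List.sorted B (fun x => x) false).Pairwise (· ≤ ·) :=
    PySem.List.sorted_pairwise B (fun x => x)
  have hA := aFold_eq_gCount (PySem.List.sorted A (fun x => x) false)
    (PySem.List.sorted B (fun x => x) false) hsa hsb
  have hB := bFold_eq_gCount (PySem.List.sorted B (fun x => x) false)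
    (PySem.List.sorted A (fun x => x) false) 0 0 (by omega)
  simp only [List.drop_zero] at hB
  unfold aFold at hA
  unfold bFold at hB
  rw [hA]
  rw [hB]
  ring
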